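-- pv_equiv track=rewrite | github.com/Turingsoft-IngSoft1/back-switcher | models/board.py | validate_board
-- ===== SOURCE A (Python) =====
-- def validate_board(board) -> bool :
--
--     valid_charset = {'R', 'G', 'B', 'Y'}
--     required_count = 9
--
--     # Verifica que el tablero tenga 6 filas
--     if len(board) != 6:
--         return False
--
--     # Inicializa un diccionario para contar los colores
--     color_counts = {color: 0 for color in valid_charset}
--
--     for row in board:
--         # Verifica que cada fila tenga 6 columnas
--         if len(row) != 6:
--             return False
--
--         for column in row:
--             # Verifica que el carácter sea parte del conjunto válido
--             if column not in valid_charset: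
--                 return False
--
--             # Aumenta el contador del color
--             color_counts[column] += 1
--
--     # Verifica que cada color tenga exactamente 9 ocurrencias
--     for color in valid_charset:
--         if color_counts[color] != required_count:
--             return False
--
--     return True
-- ===== SOURCE B (Python) =====
-- def validate_board(board) -> bool:
--     # Shape check: 6 rows of 6 cells each.
--     if len(board) != 6:
--         return False
--     for row in board:
--         if len(row) != 6:
--             return False
--     # Multiset check by sorting: a board is valid iff its 36 cells, sorted,
--     # are exactly nine 'B's, nine 'G's, nine 'R's, nine 'Y's.  Any invalid
--     # character or wrong count breaks the equality with this one fixed list.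
--     cells = sorted(c for row in board for c in row)
--     return cells == ['B'] * 9 + ['G'] * 9 + ['R'] * 9 + ['Y'] * 9
-- ===== Notes on version B (the rewrite author's own statement) =====
-- stated objective: alternative
-- what changed: Replaces A's per-cell membership test plus mutable per-color counting dict with a sort-and-compare: after the shape check, the 36 cells are sorted and compared to the single canonical list of nine of each color (multiset equality), so invalid characters and wrong counts are rejected by one list equality.
import Mathlib
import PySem

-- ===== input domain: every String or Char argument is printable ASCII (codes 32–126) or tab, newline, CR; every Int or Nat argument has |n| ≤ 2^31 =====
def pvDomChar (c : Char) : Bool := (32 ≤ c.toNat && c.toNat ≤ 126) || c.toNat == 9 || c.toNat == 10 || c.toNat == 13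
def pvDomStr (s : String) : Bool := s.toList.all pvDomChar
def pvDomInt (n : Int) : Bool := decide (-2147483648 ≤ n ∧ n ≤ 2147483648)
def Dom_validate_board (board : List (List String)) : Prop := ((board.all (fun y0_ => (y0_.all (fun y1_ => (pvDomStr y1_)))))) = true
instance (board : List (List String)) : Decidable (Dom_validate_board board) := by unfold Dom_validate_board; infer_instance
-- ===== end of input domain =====

-- B replaces A's per-cell membership test and mutable per-color counting dict by a shape
-- check plus sorting the 36 cells and comparing them to one canonical list (alternative
-- algorithm: multiset equality by sort-and-compare).

-- ===== PORT A =====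
def vbColors : List String := ["R", "G", "B", "Y"]

def vbInit : PySem.Dict String Int :=
  vbColors.foldl (fun d c => d.insert c 0) PySem.Dict.empty

-- inner 'for column in row' loop: early False on an invalid character, else bump the counter
def vbGoCols : List String → PySem.Dict String Int → Option (PySem.Dict String Int)
  | [], cnt => some cnt
  | c :: cs, cnt =>
    if c ∈ vbColors then vbGoCols cs (cnt.modify c 0 (· + 1))
    else none

-- outer 'for row in board' loop: early False on a wrong row length
def vbGoRows : List (List String) → PySem.Dict String Int → Option (PySem.Dict String Int)
  | [], cnt => some cnt
  | r :: rs, cnt =>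
    if r.length ≠ 6 then none
    else
      match vbGoCols r cnt with
      | none => none
      | some cnt' => vbGoRows rs cnt'

def validate_board (board : List (List String)) : Bool :=
  if board.length ≠ 6 then false
  else
    match vbGoRows board vbInit with
    | none => false
    | some cnt => vbColors.all (fun color => cnt.getD color 0 == 9)

-- ===== PORT B =====
-- ['B']*9 + ['G']*9 + ['R']*9 + ['Y']*9
def vbExpected : List String :=
  List.replicate 9 "B" ++ List.replicate 9 "G" ++ List.replicate 9 "R" ++ List.replicate 9 "Y"

def validate_board_alt (board : List (List String)) : Bool :=
  if board.length ≠ 6 then false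
  else if board.any (fun row => row.length ≠ 6) then false
  else
    let cells := PySem.List.sorted (board.flatMap (fun row => row)) (fun x => x) false
    cells == vbExpected

-- ===== PRECONDITION & SPEC =====
def Spec_validate_board (board : List (List String)) (out : Bool) : Prop := out = validate_board_alt board
instance (board : List (List String)) (out : Bool) : Decidable (Spec_validate_board board out) := by unfold Spec_validate_board; infer_instance

-- ===== CLAIM (what is proved, stated in full; the proofs are below) =====
def Claim_equal_validate_board : Prop := ∀ (board : List (List String)), Dom_validate_board board → Spec_validate_board board (validate_board board)

-- ===== LEMMAS AND PROOFS =====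

lemma vbGoCols_valid (cs : List String) (cnt : PySem.Dict String Int)
    (h : ∀ c ∈ cs, c ∈ vbColors) :
    vbGoCols cs cnt = some (cs.foldl (fun d x => d.modify x 0 (· + 1)) cnt) := by
  induction cs generalizing cnt with
  | nil => rfl
  | cons c cs ih =>
    simp only [vbGoCols, h c (List.mem_cons_self), if_pos, List.foldl_cons]
    exact ih _ (fun x hx => h x (List.mem_cons_of_mem _ hx))

lemma vbGoCols_invalid (cs : List String) (cnt : PySem.Dict String Int)
    (h : ∃ c ∈ cs, c ∉ vbColors) :
    vbGoCols cs cnt = none := by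
  induction cs generalizing cnt with
  | nil => simp at h
  | cons c cs ih =>
    by_cases hc : c ∈ vbColors
    · simp only [vbGoCols, hc, if_pos]
      rcases h with ⟨x, hx, hxc⟩
      rcases List.mem_cons.mp hx with rfl | hx'
      · exact absurd hc hxc
      · exact ih _ ⟨x, hx', hxc⟩
    · simp [vbGoCols, hc]

lemma vbGoRows_good (rows : List (List String)) (cnt : PySem.Dict String Int)
    (h : ∀ r ∈ rows, r.length = 6 ∧ ∀ c ∈ r, c ∈ vbColors) :
    vbGoRows rows cnt =
      some ((rows.flatMap (fun r => r)).foldl (fun d x => d.modify x 0 (· + 1)) cnt) := by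
  induction rows generalizing cnt with
  | nil => rfl
  | cons r rs ih =>
    obtain ⟨hlen, hval⟩ := h r (List.mem_cons_self)
    simp only [vbGoRows, hlen, vbGoCols_valid r cnt hval, List.flatMap_cons, List.foldl_append,
      ne_eq, not_true_eq_false, if_false]
    exact ih _ (fun x hx => h x (List.mem_cons_of_mem _ hx))

lemma vbGoRows_bad (rows : List (List String)) (cnt : PySem.Dict String Int)
    (h : ∃ r ∈ rows, r.length ≠ 6 ∨ ∃ c ∈ r, c ∉ vbColors) :
    vbGoRows rows cnt = none := by
  induction rows generalizing cnt with
  | nil => simp at h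
  | cons r rs ih =>
    by_cases hlen : r.length = 6
    · simp only [vbGoRows, hlen, ne_eq, not_true_eq_false, if_false]
      rcases h with ⟨x, hx, hbad⟩
      rcases List.mem_cons.mp hx with rfl | hx'
      · rcases hbad with hb | hb
        · exact absurd hlen hb
        · simp [vbGoCols_invalid x cnt hb]
      · cases hcols : vbGoCols r cnt with
        | none => rfl
        | some cnt' => exact ih _ ⟨x, hx', hbad⟩
    · simp [vbGoRows, hlen]

-- every element of the canonical sorted list is a valid color
lemma vbExpected_mem_colors : ∀ x ∈ vbExpected, x ∈ vbColors := by decide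

-- the canonical list is nondecreasing (string order proved on the List Char side)
lemma vbExpected_pairwise : List.Pairwise (fun a b : String => a ≤ b) vbExpected := by
  have h : List.Pairwise (fun a b : String => a.toList ≤ b.toList) vbExpected := by decide
  exact h.imp (fun hab => String.le_iff_toList_le.mpr hab)

-- B's sorted-equality holds iff the flattened board is a permutation of the canonical list
lemma vb_sorted_eq_iff (l : List String) :
    (PySem.List.sorted l (fun x => x) false = vbExpected) ↔ l.Perm vbExpected := by
  constructor
  · intro h
    have hp := PySem.List.sorted_perm l (fun x => x) false
    rw [h] at hp
    exact hp.symm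
  · intro h
    exact PySem.List.eq_of_perm_of_pairwise_le_of_injective (fun x => x)
      (fun a b hab => hab)
      ((PySem.List.sorted_perm l (fun x => x) false).trans h)
      (PySem.List.sorted_pairwise l (fun x => x)) vbExpected_pairwise

-- on an all-valid cell list, "each color counted 9 times" is exactly that permutation
lemma vb_counts_iff_perm (l : List String) (hv : ∀ c ∈ l, c ∈ vbColors) :
    (∀ c ∈ vbColors, l.count c = 9) ↔ l.Perm vbExpected := by
  rw [List.perm_iff_count]
  constructor
  · intro h a
    by_cases ha : a ∈ vbColors
    · have h9 : l.count a = 9 := h a ha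
      fin_cases ha <;> simp_all <;> rfl
    · have h0 : l.count a = 0 := List.count_eq_zero.mpr (fun hm => ha (hv a hm))
      have h0' : vbExpected.count a = 0 :=
        List.count_eq_zero.mpr (fun hm => ha (vbExpected_mem_colors a hm))
      rw [h0, h0']
  · intro h c hc
    rw [h c]
    fin_cases hc <;> rfl

-- ===== VERDICT (by name: the statement is the Claim_ definition above) =====
theorem validate_board_spec : Claim_equal_validate_board := by
  intro board _
  show validate_board board = validate_board_alt board
  by_cases h6 : board.length = 6
  · by_cases hgood : ∀ r ∈ board, r.length = 6 ∧ ∀ c ∈ r, c ∈ vbColors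
    · -- all shapes and characters valid: counts-all-9 on the left, perm-with-canonical on the right
      have hany : board.any (fun row => row.length ≠ 6) = false := by
        simp only [List.any_eq_false]
        intro r hr
        simp [(hgood r hr).1]
      rw [validate_board, validate_board_alt, if_neg (by simp [h6]), if_neg (by simp [h6]),
        vbGoRows_good board vbInit hgood, hany]
      simp only [Bool.false_eq_true, reduceIte]
      set flat := board.flatMap (fun r => r) with hflatdef
      have hv : ∀ c ∈ flat, c ∈ vbColors := by
        intro c hc
        rcases List.mem_flatMap.mp hc with ⟨r, hr, hcr⟩
        exact (hgood r hr).2 c hcr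
      rw [Bool.eq_iff_iff]
      simp only [List.all_eq_true, beq_iff_eq]
      rw [vb_sorted_eq_iff flat, ← vb_counts_iff_perm flat hv]
      constructor
      · intro h c hc
        have := h c hc
        simp [vbInit, vbColors, PySem.Dict.getD_foldl_modify_add_one,
          PySem.Dict.getD_insert, PySem.Dict.getD_empty] at this ⊢
        fin_cases hc <;> simp_all <;> omega
      · intro h c hc
        have := h c hc
        simp [vbInit, vbColors, PySem.Dict.getD_foldl_modify_add_one,
          PySem.Dict.getD_insert, PySem.Dict.getD_empty]
        fin_cases hc <;> simp_all
    · -- some row has the wrong length or an invalid character: both sides are False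
      push_neg at hgood
      obtain ⟨r, hr, hbad⟩ := hgood
      have hbad' : r.length ≠ 6 ∨ ∃ c ∈ r, c ∉ vbColors := by
        by_cases hlen : r.length = 6
        · exact Or.inr (hbad hlen)
        · exact Or.inl hlen
      rw [validate_board, if_neg (by simp [h6]), vbGoRows_bad board vbInit ⟨r, hr, hbad'⟩]
      by_cases hlens : ∀ r' ∈ board, r'.length = 6
      · -- lengths fine, so some character is invalid; the flat cells cannot match the canonical list
        have hflat : ∃ c ∈ board.flatMap (fun r => r), c ∉ vbColors := by
          rcases hbad' with hb | ⟨c, hc, hcv⟩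
          · exact absurd (hlens r hr) hb
          · exact ⟨c, List.mem_flatMap.mpr ⟨r, hr, hc⟩, hcv⟩
        have hany : board.any (fun row => row.length ≠ 6) = false := by
          simp only [List.any_eq_false]
          intro r' hr'
          simp [hlens r' hr']
        rw [validate_board_alt, if_neg (by simp [h6]), hany]
        simp only [Bool.false_eq_true, reduceIte]
        obtain ⟨c, hcmem, hcv⟩ := hflat
        symm
        simp only [beq_eq_false_iff_ne, ne_eq]
        intro hsorted
        have hperm : (board.flatMap (fun r => r)).Perm vbExpected :=
          (vb_sorted_eq_iff _).mp hsorted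
        exact hcv (vbExpected_mem_colors c (hperm.mem_iff.mp hcmem))
      · -- some row length is wrong: B's any-check fires too
        push_neg at hlens
        obtain ⟨r', hr', hrl⟩ := hlens
        rw [validate_board_alt, if_neg (by simp [h6]),
          if_pos (List.any_eq_true.mpr ⟨r', hr', by simp [hrl]⟩)]
  · simp [validate_board, validate_board_alt, h6]
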